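-- pv_equiv track=rewrite | github.com/LaTournesol/cse415hw4 | SlidingBlocksProblem.py | get_min_d
-- ===== SOURCE A (Python) =====
-- def to_2d(i):
--     x = i % C_size
--     y = i // C_size
--     return x, y
--
-- def get_min_d(c, b):
--     # smallest distance from 1x1 blocks to 2x2 blocks
--     xc, yc = to_2d(c)
--     xc2 = xc + 1
--     xc3 = xc
--     xc4 = xc + 1
--     yc2 = yc
--     yc3 = yc + 1
--     yc4 = yc + 1
--     xb, yb = to_2d(b)
--     min = abs(xb-xc) + abs(yb-yc)
--     for (x, y) in [(xc2, yc2), (xc3, yc3), (xc4, yc4)]: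
--         if abs(xb-x) + abs(yb-y) < min:
--             min = abs(xb-x) + abs(yb-y)
--     return min
--
-- C_size = 4
-- ===== SOURCE B (Python) =====
-- def get_min_d(c, b):
--     xc, yc = to_2d(c)
--     xb, yb = to_2d(b)
--     dx = min(abs(xb - xc), abs(xb - xc - 1))
--     dy = min(abs(yb - yc), abs(yb - yc - 1))
--     return dx + dy
--
-- def to_2d(i):
--     x = i % C_size
--     y = i // C_size
--     return x, y
--
-- C_size = 4
-- ===== Notes on version B (the rewrite author's own statement) =====
-- stated objective: simpler
-- what changed: Replaces the explicit loop over the four 2x2 corner cells with a separable closed form: coordinate-wise minima dx+dy, exploiting that the corners form a product set.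
import Mathlib
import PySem

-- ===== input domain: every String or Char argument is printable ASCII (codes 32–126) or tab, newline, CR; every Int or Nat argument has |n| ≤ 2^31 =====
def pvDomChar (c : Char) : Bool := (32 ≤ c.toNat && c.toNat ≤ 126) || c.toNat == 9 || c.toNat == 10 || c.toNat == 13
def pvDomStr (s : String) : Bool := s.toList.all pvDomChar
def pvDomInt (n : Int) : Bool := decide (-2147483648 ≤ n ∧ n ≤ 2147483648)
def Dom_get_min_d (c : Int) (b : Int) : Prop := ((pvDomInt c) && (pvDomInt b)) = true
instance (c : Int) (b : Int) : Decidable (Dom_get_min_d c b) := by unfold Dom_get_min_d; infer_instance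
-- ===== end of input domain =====

-- B replaces A's loop over the four corner cells by the separable closed form dx+dy (objective: simpler).
-- ===== PORT A =====
def to_2d (i : Int) : Int × Int :=
  (PySem.Int.mod i 4, PySem.Int.floordiv i 4)

def get_min_d (c : Int) (b : Int) : Int :=
  let (xc, yc) := to_2d c
  let xc2 := xc + 1
  let xc3 := xc
  let xc4 := xc + 1
  let yc2 := yc
  let yc3 := yc + 1
  let yc4 := yc + 1
  let (xb, yb) := to_2d b
  let min0 := |xb - xc| + |yb - yc|
  List.foldl (fun m (p : Int × Int) =>
      if |xb - p.1| + |yb - p.2| < m then |xb - p.1| + |yb - p.2| else m)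
    min0 [(xc2, yc2), (xc3, yc3), (xc4, yc4)]

-- ===== PORT B =====
def get_min_d_alt (c : Int) (b : Int) : Int :=
  let (xc, yc) := to_2d c
  let (xb, yb) := to_2d b
  let dx := min |xb - xc| |xb - xc - 1|
  let dy := min |yb - yc| |yb - yc - 1|
  dx + dy

-- ===== PRECONDITION & SPEC =====
def Spec_get_min_d (c : Int) (b : Int) (out : Int) : Prop := out = get_min_d_alt c b
instance (c : Int) (b : Int) (out : Int) : Decidable (Spec_get_min_d c b out) := by unfold Spec_get_min_d; infer_instance

-- ===== CLAIM (what is proved, stated in full; the proofs are below) =====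
def Claim_equal_get_min_d : Prop := ∀ (c : Int) (b : Int), Dom_get_min_d c b → Spec_get_min_d c b (get_min_d c b)

-- ===== LEMMAS AND PROOFS =====

-- ===== VERDICT (by name: the statement is the Claim_ definition above) =====
theorem get_min_d_spec : Claim_equal_get_min_d := by
  intro c b _
  unfold Spec_get_min_d get_min_d get_min_d_alt to_2d
  simp only [List.foldl]
  generalize PySem.Int.mod c 4 = xc
  generalize PySem.Int.floordiv c 4 = yc
  generalize PySem.Int.mod b 4 = xb
  generalize PySem.Int.floordiv b 4 = yb
  obtain ⟨e1, h1⟩ | ⟨e1, h1⟩ := abs_cases (xb - xc) <;>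
  obtain ⟨e2, h2⟩ | ⟨e2, h2⟩ := abs_cases (xb - (xc + 1)) <;>
  obtain ⟨e3, h3⟩ | ⟨e3, h3⟩ := abs_cases (yb - yc) <;>
  obtain ⟨e4, h4⟩ | ⟨e4, h4⟩ := abs_cases (yb - (yc + 1)) <;>
    simp only [show xb - xc - 1 = xb - (xc + 1) by ring,
               show yb - yc - 1 = yb - (yc + 1) by ring,
               e1, e2, e3, e4, min_def] <;>
    split_ifs <;> omega
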